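-- pv_equiv track=rewrite | github.com/mr-mvm/python-development-portfilio | VideoBatchAssembler/sequence_generator.py | fibonacci_first
-- ===== SOURCE A (Python) =====
-- def fibonacci_first(lst):
--     fib = [1, 2]
--     while fib[-1] + fib[-2] <= len(lst):
--         fib.append(fib[-1] + fib[-2])
--     fib_set = {f-1 for f in fib if 1 <= f <= len(lst)}
--     fib_list = [lst[i] for i in sorted(fib_set)]
--     rest = [lst[i] for i in range(len(lst)) if i not in fib_set]
--     return fib_list + rest
-- ===== SOURCE B (Python) =====
-- def fibonacci_first(lst):
--     first = []
--     positions = []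
--     a, b = 1, 2
--     while a <= len(lst):
--         first.append(lst[a - 1])
--         positions.append(a - 1)
--         a, b = b, a + b
--     rest = list(lst)
--     for p in reversed(positions):
--         del rest[p]
--     return first + rest
-- ===== Notes on version B (the rewrite author's own statement) =====
-- stated objective: alternative
-- what changed: Instead of A's set of Fibonacci indices with two full-list comprehensions (one filtered by set membership), B never tests membership at all: it jumps directly to the O(log n) Fibonacci positions to collect the front elements, then deletes exactly those positions from a copy of the list (in reverse order, so indices stay valid) to obtain the rest.
import Mathlib
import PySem

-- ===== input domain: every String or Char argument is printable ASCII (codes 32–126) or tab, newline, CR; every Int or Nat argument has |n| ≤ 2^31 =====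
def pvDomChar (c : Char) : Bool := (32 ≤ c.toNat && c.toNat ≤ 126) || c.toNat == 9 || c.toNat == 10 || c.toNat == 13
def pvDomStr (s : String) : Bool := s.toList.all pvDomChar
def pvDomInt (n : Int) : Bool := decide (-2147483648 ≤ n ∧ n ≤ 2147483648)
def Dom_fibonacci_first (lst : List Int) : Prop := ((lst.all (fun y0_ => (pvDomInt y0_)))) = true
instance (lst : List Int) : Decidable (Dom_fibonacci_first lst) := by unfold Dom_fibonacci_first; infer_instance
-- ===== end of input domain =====

-- B replaces A's fib-set + two membership-filtered comprehensions by direct jumps to the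
-- Fibonacci positions followed by reverse-order deletion of those positions from a copy;
-- same return value, an alternative algorithm (no membership tests, no set, no sort).

-- ===== PORT A =====
-- while fib[-1] + fib[-2] <= len(lst): fib.append(...)  — fuel = lst.length + 1 is enough,
-- since each append raises fib[-1] by at least 1 and the loop stops once fib[-1]+fib[-2] > len.
def fibBuild (n : Int) (fib : List Int) : Nat → List Int
  | 0 => fib
  | fuel + 1 =>
    if PySem.List.pyGetD fib (-1) 0 + PySem.List.pyGetD fib (-2) 0 ≤ n then
      fibBuild n (fib ++ [PySem.List.pyGetD fib (-1) 0 + PySem.List.pyGetD fib (-2) 0]) fuel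
    else fib

def fibonacci_first (lst : List Int) : List Int :=
  let n : Int := PySem.List.len lst
  let fib := fibBuild n [1, 2] (lst.length + 1)
  let fibSet : PySem.Set Int :=
    PySem.Set.ofList ((fib.filter (fun f => 1 ≤ f && f ≤ n)).map (fun f => f - 1))
  let fibList := (PySem.List.sorted fibSet (fun x => x) false).map
    (fun i => PySem.List.pyGetD lst i 0)
  let rest := ((PySem.List.pyRange 0 n 1).filter (fun i => !(PySem.Set.contains fibSet i))).map
    (fun i => PySem.List.pyGetD lst i 0)
  fibList ++ rest

-- ===== PORT B =====
-- while a <= len(lst): first.append(lst[a-1]); positions.append(a-1); a, b = b, a+b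
-- fuel = lst.length + 1 suffices: a starts at 1 and strictly increases each iteration.
-- lst[a-1] always has 0 <= a-1 < len here, so pyGetD is exact for the Python indexing.
def altCollect (lst : List Int) (n : Int) : Int → Int → Nat → List Int × List Int
  | _, _, 0 => ([], [])
  | a, b, fuel + 1 =>
    if a ≤ n then
      let p := altCollect lst n b (a + b) fuel
      (PySem.List.pyGetD lst (a - 1) 0 :: p.1, (a - 1) :: p.2)
    else ([], [])

-- for p in reversed(positions): del rest[p]  — each p satisfies 0 ≤ p < len(rest) at its
-- deletion (positions are distinct, deleted largest-first), so 'del rest[p]' is exactly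
-- List.eraseIdx p.toNat.
def fibonacci_first_alt (lst : List Int) : List Int :=
  let n : Int := PySem.List.len lst
  let fp := altCollect lst n 1 2 (lst.length + 1)
  let rest := fp.2.reverse.foldl (fun r p => r.eraseIdx p.toNat) lst
  fp.1 ++ rest

-- ===== PRECONDITION & SPEC =====
def Spec_fibonacci_first (lst : List Int) (out : List Int) : Prop := out = fibonacci_first_alt lst
instance (lst : List Int) (out : List Int) : Decidable (Spec_fibonacci_first lst out) := by unfold Spec_fibonacci_first; infer_instance

-- ===== CLAIM (what is proved, stated in full; the proofs are below) =====
def Claim_equal_fibonacci_first : Prop := ∀ (lst : List Int), Dom_fibonacci_first lst → Spec_fibonacci_first lst (fibonacci_first lst)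

-- ===== LEMMAS AND PROOFS =====

-- the strictly increasing Fibonacci values a, b, a+b, … that are ≤ n (fuel-bounded)
def chain (n : Int) : Int → Int → Nat → List Int
  | _, _, 0 => []
  | a, b, fuel + 1 => if a ≤ n then a :: chain n b (a + b) fuel else []

theorem chain_nil_of_gt {n a b : Int} (h : n < a) (F : Nat) : chain n a b F = [] := by
  cases F with
  | zero => rfl
  | succ F => simp only [chain]; rw [if_neg (by omega)]

theorem chain_ge {n : Int} : ∀ (F : Nat) (a b : Int), 1 ≤ a → a < b →
    ∀ v ∈ chain n a b F, a ≤ v := by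
  intro F
  induction F with
  | zero => intro a b _ _ v hv; simp [chain] at hv
  | succ F ih =>
    intro a b ha hab v hv
    simp only [chain] at hv
    split at hv
    · rcases List.mem_cons.mp hv with h | h
      · omega
      · have := ih b (a + b) (by omega) (by omega) v h; omega
    · simp at hv

theorem chain_le {n : Int} : ∀ (F : Nat) (a b : Int), ∀ v ∈ chain n a b F, v ≤ n := by
  intro F
  induction F with
  | zero => intro a b v hv; simp [chain] at hv
  | succ F ih =>
    intro a b v hv
    simp only [chain] at hv
    split at hv
    · rcases List.mem_cons.mp hv with h | h
      · omega
      · exact ih b (a + b) v h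
    · simp at hv

theorem chain_pairwise {n : Int} : ∀ (F : Nat) (a b : Int), 1 ≤ a → a < b →
    (chain n a b F).Pairwise (· < ·) := by
  intro F
  induction F with
  | zero => intro a b _ _; simp [chain]
  | succ F ih =>
    intro a b ha hab
    simp only [chain]
    split
    · refine List.pairwise_cons.mpr ⟨?_, ih b (a + b) (by omega) (by omega)⟩
      intro v hv; have := chain_ge F b (a + b) (by omega) (by omega) v hv; omega
    · simp

theorem chain_stable' {n : Int} : ∀ (F : Nat) (a b : Int), 1 ≤ a → a < b →
    (n - a + 1).toNat ≤ F → chain n a b (F + 1) = chain n a b F := by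
  intro F
  induction F with
  | zero =>
    intro a b ha hab hF
    simp only [chain]
    rw [if_neg (by omega)]
  | succ F ih =>
    intro a b ha hab hF
    by_cases h : a ≤ n
    · have l1 : chain n a b (F + 1 + 1) = a :: chain n b (a + b) (F + 1) := by
        rw [chain, if_pos h]
      have l2 : chain n a b (F + 1) = a :: chain n b (a + b) F := by
        rw [chain, if_pos h]
      rw [l1, l2, ih b (a + b) (by omega) (by omega) (by omega)]
    · rw [chain_nil_of_gt (by omega), chain_nil_of_gt (by omega)]

theorem chain_eq_of_le {n a b : Int} (ha : 1 ≤ a) (hab : a < b) :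
    ∀ (G F : Nat), (n - a + 1).toNat ≤ F → F ≤ G → chain n a b F = chain n a b G := by
  intro G
  induction G with
  | zero =>
    intro F hF hFG
    have : F = 0 := by omega
    rw [this]
  | succ G ih =>
    intro F hF hFG
    rcases Nat.lt_or_ge F (G + 1) with h | h
    · rw [ih F hF (by omega), chain_stable' G a b ha hab (by omega)]
    · have : F = G + 1 := by omega
      rw [this]

theorem fibBuild_eq (n : Int) : ∀ (F : Nat) (acc : List Int) (p q : Int),
    fibBuild n (acc ++ [p, q]) F = acc ++ [p, q] ++ chain n (p + q) (p + 2 * q) F := by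
  intro F
  induction F with
  | zero => intro acc p q; simp [fibBuild, chain]
  | succ F ih =>
    intro acc p q
    have h1 : PySem.List.pyGetD (acc ++ [p, q]) (-1) 0 = q := by
      have : acc ++ [p, q] = (acc ++ [p]) ++ [q] := by simp
      rw [this, PySem.List.pyGetD_neg_one_append_singleton]
    have h2 : PySem.List.pyGetD (acc ++ [p, q]) (-2) 0 = p := by
      rw [PySem.List.pyGetD_neg_ofNat (acc ++ [p, q]) 2 0 (by omega) (by simp)]
      simp
    simp only [fibBuild, h1, h2]
    split
    · have : acc ++ [p, q] ++ [q + p] = (acc ++ [p]) ++ [q, q + p] := by simp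
      rw [this, ih]
      simp only [chain]
      rw [if_pos (by omega : p + q ≤ n)]
      rw [show q + (q + p) = p + 2 * q from by ring,
          show q + 2 * (q + p) = (p + q) + (p + 2 * q) from by ring]
      simp [add_comm q p]
    · rw [chain_nil_of_gt (by omega) (F + 1)]
      simp

theorem filter_fib_eq_chain (lst : List Int) :
    ((fibBuild (PySem.List.len lst) [1, 2] (lst.length + 1)).filter
        (fun f => 1 ≤ f && f ≤ PySem.List.len lst))
      = chain ((lst.length : Nat) : Int) 1 2 (lst.length + 3) := by
  show ((fibBuild ((lst.length : Nat) : Int) [1, 2] (lst.length + 1)).filter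
      (fun f => 1 ≤ f && f ≤ ((lst.length : Nat) : Int)))
    = chain ((lst.length : Nat) : Int) 1 2 (lst.length + 3)
  have hb := fibBuild_eq ((lst.length : Nat) : Int) (lst.length + 1) [] 1 2
  simp only [List.nil_append] at hb
  norm_num at hb
  rw [hb]
  have hall : (chain ((lst.length : Nat) : Int) 3 5 (lst.length + 1)).filter
      (fun f => 1 ≤ f && f ≤ ((lst.length : Nat) : Int))
      = chain ((lst.length : Nat) : Int) 3 5 (lst.length + 1) := by
    rw [List.filter_eq_self]
    intro v hv
    have h1 := chain_ge (lst.length + 1) 3 5 (by omega) (by omega) v hv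
    have h2 := chain_le (lst.length + 1) 3 5 v hv
    simp; omega
  by_cases h2n : 2 ≤ ((lst.length : Nat) : Int)
  · have c1 : chain ((lst.length : Nat) : Int) 1 2 (lst.length + 2 + 1)
        = 1 :: chain ((lst.length : Nat) : Int) 2 3 (lst.length + 2) := by
      rw [chain, if_pos (by omega)]; norm_num
    have c2 : chain ((lst.length : Nat) : Int) 2 3 (lst.length + 1 + 1)
        = 2 :: chain ((lst.length : Nat) : Int) 3 5 (lst.length + 1) := by
      rw [chain, if_pos h2n]; norm_num
    rw [List.filter_cons_of_pos (by simp; omega),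
        List.filter_cons_of_pos (by simp; omega), hall,
        show lst.length + 3 = lst.length + 2 + 1 from rfl, c1,
        show lst.length + 2 = lst.length + 1 + 1 from rfl, c2]
  · by_cases h1n : 1 ≤ ((lst.length : Nat) : Int)
    · have c1 : chain ((lst.length : Nat) : Int) 1 2 (lst.length + 2 + 1)
          = 1 :: chain ((lst.length : Nat) : Int) 2 3 (lst.length + 2) := by
        rw [chain, if_pos (by omega)]; norm_num
      rw [List.filter_cons_of_pos (by simp; omega),
          List.filter_cons_of_neg (by simp; omega),
          show lst.length + 3 = lst.length + 2 + 1 from rfl, c1,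
          chain_nil_of_gt (n := ((lst.length : Nat) : Int)) (b := 3) (by omega) (lst.length + 2),
          chain_nil_of_gt (n := ((lst.length : Nat) : Int)) (b := 5) (by omega) (lst.length + 1),
          List.filter_nil]
    · have h0 : lst = [] := by simpa using h1n
      rw [List.filter_cons_of_neg (by simp [h0]),
          List.filter_cons_of_neg (by simp [h0]),
          chain_nil_of_gt (n := ((lst.length : Nat) : Int)) (b := 2) (by simp [h0]) (lst.length + 3),
          chain_nil_of_gt (n := ((lst.length : Nat) : Int)) (b := 5) (by omega) (lst.length + 1),
          List.filter_nil]

-- B's collection loop equals the chain, mapped to elements resp. positions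
theorem altCollect_eq (lst : List Int) (n : Int) : ∀ (F : Nat) (a b : Int),
    altCollect lst n a b F =
      ((chain n a b F).map (fun c => PySem.List.pyGetD lst (c - 1) 0),
       (chain n a b F).map (fun c => c - 1)) := by
  intro F
  induction F with
  | zero => intro a b; simp [altCollect, chain]
  | succ F ih =>
    intro a b
    simp only [altCollect, chain]
    split
    · simp [ih]
    · simp

-- the elements of lst whose index is not in ps, in order (proof-side reference form)
def keepIdx (lst : List Int) (ps : List Nat) : List Int :=
  ((List.range lst.length).filter (fun i => !(ps.contains i))).map (fun i => lst.getD i 0)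

theorem keepIdx_nil (lst : List Int) : keepIdx lst [] = lst := by
  unfold keepIdx
  rw [show (fun i => !(([] : List Nat).contains i)) = (fun _ => true) from by
        funext i; simp, List.filter_true]
  apply List.ext_getElem
  · simp
  · intro i h1 h2
    simp [List.getD_eq_getElem?_getD, List.getElem?_eq_getElem h2]

theorem eraseIdx_keepIdx (lst : List Int) (p : Nat) (ps : List Nat)
    (hp : p < lst.length) (hgt : ∀ q ∈ ps, p < q) :
    (keepIdx lst ps).eraseIdx p = keepIdx lst (p :: ps) := by
  unfold keepIdx
  obtain ⟨m, hm⟩ : ∃ m, lst.length = (p + 1) + m := ⟨lst.length - (p + 1), by omega⟩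
  rw [hm, List.range_add, List.filter_append, List.filter_append]
  have hpre : (List.range (p + 1)).filter (fun i => !(ps.contains i)) = List.range (p + 1) := by
    rw [List.filter_eq_self]
    intro i hi
    simp only [List.mem_range] at hi
    simp only [List.contains_eq_mem, Bool.not_eq_eq_eq_not, Bool.not_true, decide_eq_false_iff_not]
    intro hmem; have := hgt i hmem; omega
  have hpre2 : (List.range (p + 1)).filter (fun i => !((p :: ps).contains i)) = List.range p := by
    rw [show p + 1 = p + 1 from rfl, List.range_succ, List.filter_append]
    have h1 : (List.range p).filter (fun i => !((p :: ps).contains i)) = List.range p := by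
      rw [List.filter_eq_self]
      intro i hi
      simp only [List.mem_range] at hi
      simp only [List.contains_eq_mem, List.mem_cons, Bool.not_eq_eq_eq_not, Bool.not_true,
        decide_eq_false_iff_not]
      rintro (h | hmem)
      · omega
      · have := hgt i hmem; omega
    rw [h1, List.filter_cons_of_neg (by simp), List.filter_nil, List.append_nil]
  have htail : ((List.range m).map (fun x => p + 1 + x)).filter (fun i => !((p :: ps).contains i))
      = ((List.range m).map (fun x => p + 1 + x)).filter (fun i => !(ps.contains i)) := by
    refine List.filter_congr ?_
    intro j hj
    rcases List.mem_map.mp hj with ⟨k, _, rfl⟩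
    have hne : p + 1 + k ≠ p := by omega
    simp [List.contains_eq_mem, hne]
  rw [hpre, hpre2, htail, List.map_append, List.map_append,
      List.eraseIdx_append_of_lt_length (by simp),
      show List.range (p + 1) = List.range p ++ [p] from List.range_succ,
      List.map_append, List.eraseIdx_append_of_length_le (by simp)]
  simp

theorem foldr_eraseIdx (lst : List Int) : ∀ (ps : List Nat), ps.Pairwise (· < ·) →
    (∀ p ∈ ps, p < lst.length) →
    ps.foldr (fun p r => r.eraseIdx p) lst = keepIdx lst ps := by
  intro ps
  induction ps with
  | nil => intro _ _; simp [keepIdx_nil]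
  | cons p ps ih =>
    intro hpw hlt
    rcases List.pairwise_cons.mp hpw with ⟨hgt, hpw'⟩
    simp only [List.foldr_cons]
    rw [ih hpw' (fun q hq => hlt q (List.mem_cons_of_mem _ hq)),
        eraseIdx_keepIdx lst p ps (hlt p (List.mem_cons_self)) hgt]

-- A's range/filter/map form of 'rest' equals keepIdx over the Nat positions
theorem range_filter_eq_keepIdx (lst : List Int) (qs : List Int) (hq : ∀ q ∈ qs, 0 ≤ q) :
    ((PySem.List.pyRange 0 ((lst.length : Nat) : Int) 1).filter
        (fun i => !(qs.contains i))).map (fun i => PySem.List.pyGetD lst i 0)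
      = keepIdx lst (qs.map Int.toNat) := by
  rw [PySem.List.pyRange_one, List.filter_map, List.map_map]
  unfold keepIdx
  rw [show ((lst.length : Int) - 0) = ((lst.length : Nat) : Int) from by ring, Int.toNat_natCast]
  have hfeq : ((fun i => !(qs.contains i)) ∘ (fun k : Nat => (0 : Int) + k))
      = (fun k : Nat => !((qs.map Int.toNat).contains k)) := by
    funext k
    have hiff : ((k : Int) ∈ qs) ↔ (k ∈ qs.map Int.toNat) := by
      constructor
      · intro h; exact List.mem_map.mpr ⟨(k : Int), h, by omega⟩
      · intro h
        rcases List.mem_map.mp h with ⟨q, hmem, hk⟩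
        have h0 := hq q hmem
        have hqk : q = (k : Int) := by omega
        rwa [← hqk]
    simp only [Function.comp, zero_add, List.contains_eq_mem, hiff]
  rw [hfeq]
  refine List.map_congr_left ?_
  intro k _
  simp [PySem.List.pyGetD_natCast]

theorem fibonacci_first_eq (lst : List Int) :
    fibonacci_first lst = fibonacci_first_alt lst := by
  have hC : chain ((lst.length : Nat) : Int) 1 2 (lst.length + 3)
      = chain ((lst.length : Nat) : Int) 1 2 (lst.length + 3) := rfl
  generalize hCdef : chain ((lst.length : Nat) : Int) 1 2 (lst.length + 3) = C at hC
  have hCpw : C.Pairwise (· < ·) := hCdef ▸ chain_pairwise _ 1 2 (by omega) (by omega)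
  have hCge : ∀ v ∈ C, 1 ≤ v := hCdef ▸ chain_ge _ 1 2 (by omega) (by omega)
  have hCle : ∀ v ∈ C, v ≤ ((lst.length : Nat) : Int) := hCdef ▸ chain_le _ 1 2
  -- A's side
  have hmap_pw : (C.map (fun f => f - 1)).Pairwise (· < ·) :=
    List.pairwise_map.mpr (hCpw.imp (fun h => by omega))
  have hnd : (C.map (fun f => f - 1)).Nodup := hmap_pw.imp (fun h => ne_of_lt h)
  have hset := PySem.Set.ofList_eq_self_of_nodup _ hnd
  have hsorted := PySem.List.sorted_eq_self_of_pairwise (C.map (fun f => f - 1)) (fun x => x)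
    (hmap_pw.imp (fun h => le_of_lt h))
  -- B's side: collection
  have hchain_eq : chain ((lst.length : Nat) : Int) 1 2 (lst.length + 1) = C := by
    rw [← hCdef]
    exact chain_eq_of_le (by omega) (by omega) (lst.length + 3) (lst.length + 1)
      (by omega) (by omega)
  have hcoll : altCollect lst ((lst.length : Nat) : Int) 1 2 (lst.length + 1) =
      (C.map (fun c => PySem.List.pyGetD lst (c - 1) 0), C.map (fun c => c - 1)) := by
    rw [altCollect_eq lst ((lst.length : Nat) : Int) (lst.length + 1) 1 2, hchain_eq]
  -- B's side: the deletion fold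
  have hps_pw : ((C.map (fun c => c - 1)).map Int.toNat).Pairwise (· < ·) := by
    rw [List.pairwise_map, List.pairwise_map]
    refine List.pairwise_iff_forall_sublist.mpr ?_
    intro a b hsl
    have hmema : a ∈ C := hsl.subset (by simp)
    have hab : a < b := List.pairwise_iff_forall_sublist.mp hCpw hsl
    have := hCge a hmema
    omega
  have hps_lt : ∀ p ∈ (C.map (fun c => c - 1)).map Int.toNat, p < lst.length := by
    intro p hp
    rcases List.mem_map.mp hp with ⟨q, hq, rfl⟩
    rcases List.mem_map.mp hq with ⟨c, hc, rfl⟩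
    have := hCge c hc
    have := hCle c hc
    omega
  have hfold : (C.map (fun c => c - 1)).reverse.foldl (fun r p => r.eraseIdx p.toNat) lst
      = keepIdx lst ((C.map (fun c => c - 1)).map Int.toNat) := by
    rw [List.foldl_reverse, ← foldr_eraseIdx lst _ hps_pw hps_lt]
    simp only [List.foldr_map]
  -- assemble
  simp only [fibonacci_first, fibonacci_first_alt]
  rw [filter_fib_eq_chain lst, PySem.List.len_eq, hCdef, hset, hsorted]
  simp only [hcoll]
  rw [hfold]
  congr 1
  · rw [List.map_map]; rfl
  · rw [← range_filter_eq_keepIdx lst (C.map (fun c => c - 1))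
        (by intro q hq; rcases List.mem_map.mp hq with ⟨c, hc, rfl⟩; have := hCge c hc; omega)]
    refine congrArg _ (List.filter_congr ?_)
    intro i _
    rw [PySem.Set.contains_eq_listContains]

-- ===== VERDICT (by name: the statement is the Claim_ definition above) =====
theorem fibonacci_first_spec : Claim_equal_fibonacci_first := by
  intro lst _
  exact fibonacci_first_eq lst
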